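-- pv_equiv track=rewrite | github.com/tataru1/Fundamentele-Programarii | PycharmProjects/pythonProject4/main.py | langste_aufeinand_folge
-- ===== SOURCE A (Python) =====
-- def langste_aufeinand_folge(numbers):   # se defineste functia, care primeste un vector de numere
--     if not numbers:                     # verificam daca vectorul e gol
--         return []                       # verificam o lista goala daca e gol vectorul
--
--     aktuell_folge = [numbers[0]]        # initializam o lista, care retine pozitia actuala
--     langste_folge = [numbers[0]]        # initializam o lista care retine cea mai lunga secventa
--
--     for i in range(1, len(numbers)):    # trecem prin vector incepand de la al 2-lea element
--         if numbers[i] % 10 == numbers[i - 1] % 10:  # verificam daca uc a elementului curent este egala cu uc a elementului precedent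
--             aktuell_folge.append(numbers[i])
--         else:
--             if len(aktuell_folge) > len(langste_folge): # daca nu au acelasi uc, verificam daca secventa curenta, este mai mare dact cea mai lunga secventa
--                 langste_folge = aktuell_folge           # daca da, cea mai lunga secventa preia valoarea secventei curente
--             aktuell_folge = [numbers[i]]                # secventa curenta este reinitializata
--
--     if len(aktuell_folge) > len(langste_folge):         # verificam din nou daca secventa actuala este mai mare decat cea mai lunga secventa
--         langste_folge = aktuell_folge                   # daca este schimbam valoarea
--
--     return langste_folge                                # returnam cea mai lunga secventa
-- ===== SOURCE B (Python) =====
-- from itertools import groupby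
--
-- def langste_aufeinand_folge(numbers):
--     if not numbers:
--         return []
--     groups = [list(g) for _, g in groupby(numbers, key=lambda x: x % 10)]
--     return max(groups, key=len)
-- ===== Notes on version B (the rewrite author's own statement) =====
-- stated objective: idiomatic
-- what changed: Replaces the index-based running-best scan (current run + best-so-far with strict-> updates) by a build-all-groups-then-select decomposition: itertools.groupby splits the list into maximal equal-last-digit runs and max(groups, key=len) picks the first longest, matching A's earliest-tie behaviour.
import Mathlib
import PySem

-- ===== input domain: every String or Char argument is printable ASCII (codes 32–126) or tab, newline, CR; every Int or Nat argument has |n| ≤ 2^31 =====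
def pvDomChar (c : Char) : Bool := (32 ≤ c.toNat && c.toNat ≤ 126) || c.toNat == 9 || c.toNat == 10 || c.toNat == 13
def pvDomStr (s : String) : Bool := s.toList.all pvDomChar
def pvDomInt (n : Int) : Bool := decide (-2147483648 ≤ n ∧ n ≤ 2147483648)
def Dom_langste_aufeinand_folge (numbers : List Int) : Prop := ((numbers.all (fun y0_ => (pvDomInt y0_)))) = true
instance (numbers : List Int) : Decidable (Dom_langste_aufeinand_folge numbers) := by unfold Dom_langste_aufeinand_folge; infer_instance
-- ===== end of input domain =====

-- B replaces A's index-based running-best scan by an idiomatic build-all-groups-then-select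
-- decomposition (groupby on last digit, then max by length); same O(n) cost, same result.


-- ===== PORT A =====
-- the body of A's for-loop over i in range(1, len(numbers)); state = (aktuell_folge, langste_folge)
def pvBodyA (numbers : List Int) (st : List Int × List Int) (i : Int) : List Int × List Int :=
  if PySem.Int.mod (PySem.List.pyGetD numbers i 0) 10
      = PySem.Int.mod (PySem.List.pyGetD numbers (i - 1) 0) 10 then
    (st.1 ++ [PySem.List.pyGetD numbers i 0], st.2)
  else
    ([PySem.List.pyGetD numbers i 0],
     if st.2.length < st.1.length then st.1 else st.2)

def langste_aufeinand_folge (numbers : List Int) : List Int :=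
  match numbers with
  | [] => []
  | n0 :: _ =>
    let st :=
      (PySem.List.pyRange 1 (numbers.length : Int) 1).foldl (pvBodyA numbers) ([n0], [n0])
    if st.2.length < st.1.length then st.1 else st.2

-- ===== PORT B =====
-- port of [list(g) for _, g in itertools.groupby(rest-of-list, key=lambda x: x % 10)],
-- continuing a current run `cur` whose key is `k` (exact: maximal runs of equal x % 10)
def pvGroupRuns (k : Int) (cur : List Int) : List Int → List (List Int)
  | [] => [cur]
  | x :: xs =>
    if PySem.Int.mod x 10 = k then pvGroupRuns k (cur ++ [x]) xs
    else cur :: pvGroupRuns (PySem.Int.mod x 10) [x] xs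

def langste_aufeinand_folge_alt (numbers : List Int) : List Int :=
  match numbers with
  | [] => []
  | x :: xs =>
    let groups := pvGroupRuns (PySem.Int.mod x 10) [x] xs
    (PySem.List.max? groups (fun g => g.length)).getD []

-- ===== PRECONDITION & SPEC =====
def Spec_langste_aufeinand_folge (numbers : List Int) (out : List Int) : Prop := out = langste_aufeinand_folge_alt numbers
instance (numbers : List Int) (out : List Int) : Decidable (Spec_langste_aufeinand_folge numbers out) := by unfold Spec_langste_aufeinand_folge; infer_instance

-- ===== CLAIM (what is proved, stated in full; the proofs are below) =====
def Claim_equal_langste_aufeinand_folge : Prop := ∀ (numbers : List Int), Dom_langste_aufeinand_folge numbers → Spec_langste_aufeinand_folge numbers (langste_aufeinand_folge numbers)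

-- ===== LEMMAS AND PROOFS =====

-- proof-side recursion equivalent to A's loop: prev = numbers[i-1], the rest of the list ahead
def pvStepA (st : List Int × List Int) (prev c : Int) : List Int × List Int :=
  if PySem.Int.mod c 10 = PySem.Int.mod prev 10 then (st.1 ++ [c], st.2)
  else ([c], if st.2.length < st.1.length then st.1 else st.2)

def pvFwdA (prev : Int) : List Int → (List Int × List Int) → List Int × List Int
  | [], st => st
  | c :: rest, st => pvFwdA c rest (pvStepA st prev c)

-- A's final "keep the strictly longer run" choice
def pvFinal (st : List Int × List Int) : List Int :=
  if st.2.length < st.1.length then st.1 else st.2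

def pvPick (b g : List Int) : List Int := if b.length < g.length then g else b

lemma pvBodyA_index (st : List Int × List Int) (pre suf : List Int) (prev c : Int) :
    pvBodyA (pre ++ prev :: c :: suf) st ((pre.length + 1 : Nat) : Int) = pvStepA st prev c := by
  have h1 : PySem.List.pyGetD (pre ++ prev :: c :: suf) ((pre.length + 1 : Nat) : Int) 0 = c := by
    rw [PySem.List.pyGetD_natCast]
    simp [List.getD]
  have h2 : PySem.List.pyGetD (pre ++ prev :: c :: suf) (((pre.length + 1 : Nat) : Int) - 1) 0 = prev := by
    have he : ((pre.length + 1 : Nat) : Int) - 1 = ((pre.length : Nat) : Int) := by push_cast; ring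
    rw [he, PySem.List.pyGetD_natCast]
    simp [List.getD]
  simp only [pvBodyA, pvStepA, h1, h2]

lemma pvFoldA_eq_fwdA (suffix : List Int) : ∀ (pre : List Int) (prev : Int) (st : List Int × List Int),
    (PySem.List.pyRange ((pre.length + 1 : Nat) : Int) ((pre.length + 1 + suffix.length : Nat) : Int) 1).foldl
      (pvBodyA (pre ++ prev :: suffix)) st = pvFwdA prev suffix st := by
  induction suffix with
  | nil =>
    intro pre prev st
    rw [PySem.List.pyRange_one_eq_nil (by simp)]
    rfl
  | cons c rest ih =>
    intro pre prev st
    rw [PySem.List.pyRange_one_cons (by push_cast [List.length_cons]; omega)]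
    simp only [List.foldl_cons]
    rw [pvBodyA_index st pre rest prev c]
    have hcast1 : ((pre.length + 1 : Nat) : Int) + 1 = (((pre ++ [prev]).length + 1 : Nat) : Int) := by
      push_cast [List.length_append, List.length_cons, List.length_nil]; ring
    have hcast2 : ((pre.length + 1 + (c :: rest).length : Nat) : Int)
        = (((pre ++ [prev]).length + 1 + rest.length : Nat) : Int) := by
      push_cast [List.length_append, List.length_cons, List.length_nil]; ring
    have hlist : pre ++ prev :: c :: rest = (pre ++ [prev]) ++ c :: rest := by simp
    rw [hcast1, hcast2, hlist, ih (pre ++ [prev]) c]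
    rfl

-- A's recursion computes the pick-fold of the groups of (cur ++ rest), started from best-so-far la
lemma pvFwdA_eq_groups (rest : List Int) : ∀ (prev : Int) (cur la : List Int),
    pvFinal (pvFwdA prev rest (cur, la))
      = (pvGroupRuns (PySem.Int.mod prev 10) cur rest).foldl pvPick la := by
  induction rest with
  | nil =>
    intro prev cur la
    simp only [pvFwdA, pvFinal, pvGroupRuns, List.foldl_cons, List.foldl_nil, pvPick]
  | cons c rest ih =>
    intro prev cur la
    by_cases h : PySem.Int.mod c 10 = PySem.Int.mod prev 10
    · simp only [pvFwdA, pvStepA, pvGroupRuns, if_pos h]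
      rw [ih c (cur ++ [c]) la, h]
    · simp only [pvFwdA, pvStepA, pvGroupRuns, if_neg h]
      rw [ih c [c] (if la.length < cur.length then cur else la), List.foldl_cons]
      rfl

-- the first group produced by pvGroupRuns extends cur
lemma pvGroupRuns_head (rest : List Int) : ∀ (k : Int) (cur : List Int),
    ∃ t gs, pvGroupRuns k cur rest = (cur ++ t) :: gs := by
  induction rest with
  | nil => intro k cur; exact ⟨[], [], by simp [pvGroupRuns]⟩
  | cons c rest ih =>
    intro k cur
    by_cases h : PySem.Int.mod c 10 = k
    · obtain ⟨t, gs, hgs⟩ := ih k (cur ++ [c])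
      refine ⟨c :: t, gs, ?_⟩
      simp only [pvGroupRuns, if_pos h, hgs, List.append_assoc, List.singleton_append]
    · exact ⟨[], pvGroupRuns (PySem.Int.mod c 10) [c] rest,
        by simp only [pvGroupRuns, if_neg h, List.append_nil]⟩

-- max(groups, key=len) is the pick-fold started at the first group
lemma pvMax_eq_fold (gs : List (List Int)) : ∀ (g : List Int),
    (PySem.List.max? (g :: gs) (fun h => h.length)).getD [] = gs.foldl pvPick g := by
  induction gs with
  | nil => intro g; rfl
  | cons h t ih =>
    intro g
    have step : PySem.List.max? (g :: h :: t) (fun x => x.length)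
        = PySem.List.max? (pvPick g h :: t) (fun x => x.length) := by
      simp only [PySem.List.max?, List.foldl_cons, pvPick]
      split_ifs <;> rfl
    rw [step, ih, List.foldl_cons]

-- ===== VERDICT (by name: the statement is the Claim_ definition above) =====
theorem langste_aufeinand_folge_spec : Claim_equal_langste_aufeinand_folge := by
  unfold Claim_equal_langste_aufeinand_folge
  intro numbers _
  unfold Spec_langste_aufeinand_folge
  match numbers with
  | [] => rfl
  | n0 :: rest =>
    show pvFinal ((PySem.List.pyRange 1 (((n0 :: rest).length : Nat) : Int) 1).foldl
          (pvBodyA (n0 :: rest)) ([n0], [n0]))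
        = langste_aufeinand_folge_alt (n0 :: rest)
    have key := pvFoldA_eq_fwdA rest [] n0 ([n0], [n0])
    simp only [List.length_nil, List.nil_append, Nat.zero_add] at key
    push_cast at key
    have e2 : (((n0 :: rest).length : Nat) : Int) = 1 + (rest.length : Int) := by
      push_cast [List.length_cons]; omega
    rw [e2, key, pvFwdA_eq_groups rest n0 [n0] [n0]]
    obtain ⟨t, gs, hgs⟩ := pvGroupRuns_head rest (PySem.Int.mod n0 10) [n0]
    show _ = (PySem.List.max? (pvGroupRuns (PySem.Int.mod n0 10) [n0] rest) (fun g => g.length)).getD []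
    rw [hgs, pvMax_eq_fold, List.foldl_cons]
    have hp : pvPick [n0] ([n0] ++ t) = [n0] ++ t := by
      cases t with
      | nil => simp [pvPick]
      | cons a b => simp [pvPick]
    rw [hp]
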